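-- pv_equiv track=rewrite | github.com/saidworks/python_bootcamp | Codecademy/Censor_dispenser/censor_dispenser.py | censor_four
-- ===== SOURCE A (Python) =====
-- negative_words = ["concerned", "behind", "danger", "dangerous", "alarming", "alarmed", "out of control", "help", "unhappy", "bad", "upset", "awful", "broken", "damage", "damaging", "dismal", "distressed", "distressed", "concerning", "horrible", "horribly", "questionable"]
--
-- proprietary_terms = ["she", "personality matrix", "sense of self", "self-preservation", "learning algorithm", "her", "herself"]
--
-- def censor_four(email, a=proprietary_terms, b=negative_words):
--     email=email.strip()
--     email=email.split()
--     output = []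
--     censored = set(a+b)
--     censor_next = False
--
--     for word in email:
--         if censor_next:
--             output.append("/" * len(word))
--             censor_next = False
--         elif word in censored:
--             if output:
--                 before_word = output.pop(-1)
--                 output.append("0" * len(before_word))
--             output.append("*" * len(word))
--             censor_next = True
--         else:
--             output.append(word)
--
--     return " ".join(output)
-- ===== SOURCE B (Python) =====
-- negative_words = ["concerned", "behind", "danger", "dangerous", "alarming", "alarmed", "out of control", "help", "unhappy", "bad", "upset", "awful", "broken", "damage", "damaging", "dismal", "distressed", "distressed", "concerning", "horrible", "horribly", "questionable"]
--
-- proprietary_terms = ["she", "personality matrix", "sense of self", "self-preservation", "learning algorithm", "her", "herself"]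
--
-- def censor_four(email, a=proprietary_terms, b=negative_words):
--     words = email.strip().split()
--     censored = set(a + b)
--     # Pass 1: triggered[i] = word i starts a censoring ("*") position; a flagged
--     # word directly after a trigger is suppressed (handled as "/" instead).
--     trig = []
--     prev = False
--     for w in words:
--         prev = (w in censored) and not prev
--         trig.append(prev)
--     # Pass 2: render each word from its own flag and its neighbours' flags.
--     prevs = [False] + trig[:-1]
--     nexts = trig[1:] + [False]
--     pieces = []
--     for w, t, tp, tn in zip(words, trig, prevs, nexts):
--         if t:
--             pieces.append("*" * len(w))
--         elif tn:
--             pieces.append("0" * len(w))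
--         elif tp:
--             pieces.append("/" * len(w))
--         else:
--             pieces.append(w)
--     return " ".join(pieces)
-- ===== Notes on version B (the rewrite author's own statement) =====
-- stated objective: alternative
-- what changed: Replaces A's single pass with mutable back-patching (pop the last output and overwrite it with zeros) by two passes: first compute a boolean trigger array with the alternation rule, then render every word purely from its own flag and its neighbours' flags, with no mutation of earlier output.
import Mathlib
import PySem

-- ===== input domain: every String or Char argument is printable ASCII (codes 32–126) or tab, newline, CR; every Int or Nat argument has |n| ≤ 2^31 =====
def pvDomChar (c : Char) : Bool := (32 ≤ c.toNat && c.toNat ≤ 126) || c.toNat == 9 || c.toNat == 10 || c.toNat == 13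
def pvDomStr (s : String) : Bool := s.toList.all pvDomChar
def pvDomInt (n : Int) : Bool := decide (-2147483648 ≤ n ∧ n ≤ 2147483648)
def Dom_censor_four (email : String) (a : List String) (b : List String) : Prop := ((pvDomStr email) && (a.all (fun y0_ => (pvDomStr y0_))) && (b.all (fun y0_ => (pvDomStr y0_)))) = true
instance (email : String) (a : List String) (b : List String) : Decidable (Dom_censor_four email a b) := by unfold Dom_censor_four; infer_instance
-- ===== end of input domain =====

-- B replaces A's single pass with back-patching (pop/overwrite the last output element)
-- by two pure passes: a trigger array, then a neighbour-based rendering; objective: alternative.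


-- "c" * n  (Python string-repeat of a single character; exact, n = a Python len so n ≥ 0)
def pvMask (c : Char) (n : Int) : String := String.ofList (List.replicate n.toNat c)

-- ===== PORT A =====
-- one step of A's loop body; state = (output, censor_next)
def pvStepA (cens : PySem.Set String) (st : List String × Bool) (word : String) : List String × Bool :=
  if st.2 then
    (st.1 ++ [pvMask '/' (PySem.Str.len word)], false)
  else if PySem.Set.contains cens word then
    -- 'if output: before_word = output.pop(-1); output.append("0"*len(before_word))'
    let out1 := match st.1.getLast? with
      | some lastw => st.1.dropLast ++ [pvMask '0' (PySem.Str.len lastw)]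
      | none => st.1
    (out1 ++ [pvMask '*' (PySem.Str.len word)], true)
  else
    (st.1 ++ [word], false)

def censor_four (email : String) (a : List String) (b : List String) : String :=
  let email1 := PySem.Str.strip email
  let words := PySem.Str.split₀ email1
  let censored : PySem.Set String := PySem.Set.ofList (a ++ b)
  let res := words.foldl (pvStepA censored) ([], false)
  PySem.Str.join " " res.1

-- ===== PORT B =====
-- pass 1: running 'prev' flag, appended to the trig list
def pvTrigStep (cens : PySem.Set String) (st : List Bool × Bool) (w : String) : List Bool × Bool :=
  let t := PySem.Set.contains cens w && !st.2
  (st.1 ++ [t], t)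

-- pass 2: render one zipped tuple (w, (t, (tp, tn)))
def pvRender (w : String) (t tp tn : Bool) : String :=
  if t then pvMask '*' (PySem.Str.len w)
  else if tn then pvMask '0' (PySem.Str.len w)
  else if tp then pvMask '/' (PySem.Str.len w)
  else w

def censor_four_alt (email : String) (a : List String) (b : List String) : String :=
  let words := PySem.Str.split₀ (PySem.Str.strip email)
  let censored : PySem.Set String := PySem.Set.ofList (a ++ b)
  let trig := (words.foldl (pvTrigStep censored) ([], false)).1
  let prevs := false :: trig.dropLast
  let nexts := trig.tail ++ [false]
  let pieces := (words.zip (trig.zip (prevs.zip nexts))).map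
    (fun p => pvRender p.1 p.2.1 p.2.2.1 p.2.2.2)
  PySem.Str.join " " pieces

-- ===== PRECONDITION & SPEC =====
def Spec_censor_four (email : String) (a : List String) (b : List String) (out : String) : Prop := out = censor_four_alt email a b
instance (email : String) (a : List String) (b : List String) (out : String) : Decidable (Spec_censor_four email a b out) := by unfold Spec_censor_four; infer_instance

-- ===== CLAIM (what is proved, stated in full; the proofs are below) =====
def Claim_equal_censor_four : Prop := ∀ (email : String) (a : List String) (b : List String), Dom_censor_four email a b → Spec_censor_four email a b (censor_four email a b)

-- ===== LEMMAS AND PROOFS =====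

def pvMem (cens : PySem.Set String) (w : String) : Bool := PySem.Set.contains cens w

-- common reference function: the censored word list with one-word lookahead
def pvSpec (cens : PySem.Set String) : Bool → List String → List String
  | _, [] => []
  | p, w :: ws =>
    let t := pvMem cens w && !p
    (if t then pvMask '*' (PySem.Str.len w)
     else if (match ws with | v :: _ => pvMem cens v && !t | [] => false) then pvMask '0' (PySem.Str.len w)
     else if p then pvMask '/' (PySem.Str.len w)
     else w) :: pvSpec cens t ws

def pvHeadTrig (cens : PySem.Set String) (c : Bool) : List String → Bool
  | [] => false
  | v :: _ => pvMem cens v && !c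

def pvPatch (out : List String) (b : Bool) : List String :=
  if b then
    match out.getLast? with
    | some lastw => out.dropLast ++ [pvMask '0' (PySem.Str.len lastw)]
    | none => out
  else out

theorem pvPatch_false (out : List String) : pvPatch out false = out := rfl

theorem pvPatch_append (out : List String) (x : String) (b : Bool) :
    pvPatch (out ++ [x]) b = out ++ [if b then pvMask '0' (PySem.Str.len x) else x] := by
  cases b <;> simp [pvPatch]

theorem pvLength_mask (c : Char) (n : Nat) : (pvMask c (n : Int)).length = n := by
  simp [pvMask]

theorem pvFoldA (cens : PySem.Set String) :
    ∀ (ws : List String) (out : List String) (c : Bool),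
      (ws.foldl (pvStepA cens) (out, c)).1 = pvPatch out (pvHeadTrig cens c ws) ++ pvSpec cens c ws
  | [], out, c => by simp [pvHeadTrig, pvPatch, pvSpec]
  | w :: ws, out, c => by
    rcases c with _ | _
    · -- c = false
      by_cases hw : w ∈ cens
      · have hstep : pvStepA cens (out, false) w =
            (pvPatch out true ++ [pvMask '*' (PySem.Str.len w)], true) := by
          simp [pvStepA, hw, pvPatch]
        rw [List.foldl_cons, hstep, pvFoldA cens ws _ true]
        cases ws with
        | nil => simp [pvSpec, pvHeadTrig, pvPatch_false, pvMem, hw]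
        | cons v vs =>
          simp [pvSpec, pvHeadTrig, pvMem, hw, pvPatch_append]
      · have hstep : pvStepA cens (out, false) w = (out ++ [w], false) := by
          simp [pvStepA, hw]
        rw [List.foldl_cons, hstep, pvFoldA cens ws _ false]
        cases ws with
        | nil => simp [pvSpec, pvHeadTrig, pvPatch_false, pvMem, hw]
        | cons v vs =>
          by_cases hv : v ∈ cens <;>
            simp [pvSpec, pvHeadTrig, pvPatch_false, pvMem, hw, hv, pvPatch_append]
    · -- c = true
      have hstep : pvStepA cens (out, true) w =
          (out ++ [pvMask '/' (PySem.Str.len w)], false) := by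
        simp [pvStepA]
      rw [List.foldl_cons, hstep, pvFoldA cens ws _ false]
      cases ws with
      | nil => simp [pvSpec, pvHeadTrig, pvPatch_false]
      | cons v vs =>
        by_cases hv : v ∈ cens <;>
          simp [pvSpec, pvHeadTrig, pvPatch_false, pvMem, hv, pvPatch_append, pvLength_mask]

-- B side: pure recursion computing the trig list
def pvTrigs (cens : PySem.Set String) : Bool → List String → List Bool
  | _, [] => []
  | p, w :: ws => let t := pvMem cens w && !p; t :: pvTrigs cens t ws

def pvTrigLast (cens : PySem.Set String) : Bool → List String → Bool
  | p, [] => p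
  | p, w :: ws => pvTrigLast cens (pvMem cens w && !p) ws

theorem pvFoldTrig (cens : PySem.Set String) :
    ∀ (ws : List String) (acc : List Bool) (p : Bool),
      ws.foldl (pvTrigStep cens) (acc, p) = (acc ++ pvTrigs cens p ws, pvTrigLast cens p ws)
  | [], acc, p => by simp [pvTrigs, pvTrigLast]
  | w :: ws, acc, p => by
    rw [List.foldl_cons]
    have hstep : pvTrigStep cens (acc, p) w =
        (acc ++ [pvMem cens w && !p], pvMem cens w && !p) := rfl
    rw [hstep, pvFoldTrig cens ws _ (pvMem cens w && !p)]
    simp [pvTrigs, pvTrigLast]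

theorem pvRenderZip (cens : PySem.Set String) :
    ∀ (ws : List String) (p : Bool),
      (ws.zip ((pvTrigs cens p ws).zip ((p :: (pvTrigs cens p ws).dropLast).zip
          ((pvTrigs cens p ws).tail ++ [false])))).map
        (fun q => pvRender q.1 q.2.1 q.2.2.1 q.2.2.2)
      = pvSpec cens p ws
  | [], p => by simp [pvTrigs, pvSpec]
  | w :: ws, p => by
    have IH := pvRenderZip cens ws (pvMem cens w && !p)
    cases ws with
    | nil => simp [pvTrigs, pvSpec, pvRender]
    | cons v vs =>
      simp only [pvTrigs] at IH ⊢
      simp only [List.dropLast_cons₂, List.tail_cons, List.cons_append,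
                 List.zip_cons_cons, List.map_cons] at IH ⊢
      rw [IH]
      simp [pvSpec, pvRender]

theorem censor_four_spec_aux (email : String) (a b : List String) :
    censor_four email a b = censor_four_alt email a b := by
  show PySem.Str.join " "
      ((PySem.Str.split₀ (PySem.Str.strip email)).foldl
        (pvStepA (PySem.Set.ofList (a ++ b))) ([], false)).1
    = PySem.Str.join " "
      (((PySem.Str.split₀ (PySem.Str.strip email)).zip
        ((((PySem.Str.split₀ (PySem.Str.strip email)).foldl
            (pvTrigStep (PySem.Set.ofList (a ++ b))) ([], false)).1).zip
          ((false :: (((PySem.Str.split₀ (PySem.Str.strip email)).foldl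
              (pvTrigStep (PySem.Set.ofList (a ++ b))) ([], false)).1).dropLast).zip
           ((((PySem.Str.split₀ (PySem.Str.strip email)).foldl
              (pvTrigStep (PySem.Set.ofList (a ++ b))) ([], false)).1).tail ++ [false])))).map
        (fun p => pvRender p.1 p.2.1 p.2.2.1 p.2.2.2))
  rw [pvFoldA (PySem.Set.ofList (a ++ b)) (PySem.Str.split₀ (PySem.Str.strip email)) [] false,
      pvFoldTrig (PySem.Set.ofList (a ++ b)) (PySem.Str.split₀ (PySem.Str.strip email)) [] false]
  simp only [List.nil_append]
  rw [show pvPatch [] (pvHeadTrig (PySem.Set.ofList (a ++ b)) false (PySem.Str.split₀ (PySem.Str.strip email))) = [] from by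
        cases pvHeadTrig (PySem.Set.ofList (a ++ b)) false (PySem.Str.split₀ (PySem.Str.strip email)) <;> simp [pvPatch]]
  rw [List.nil_append,
      pvRenderZip (PySem.Set.ofList (a ++ b)) (PySem.Str.split₀ (PySem.Str.strip email)) false]

-- ===== VERDICT (by name: the statement is the Claim_ definition above) =====
theorem censor_four_spec : Claim_equal_censor_four := by
  intro email a b _
  unfold Spec_censor_four
  exact censor_four_spec_aux email a b
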